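-- pv_equiv track=rewrite | github.com/raeez/chiral-bar-cobar | compute/lib/vvmf_hecke.py | _eta_coeffs
-- ===== SOURCE A (Python) =====
-- from typing import Dict, List, Optional, Tuple
--
-- def _eta_coeffs(num_terms: int) -> List[int]:
--     """Coefficients of q^{-1/24} * eta(tau) = prod_{n>=1}(1 - q^n).
--
--     Returns list a[0], a[1], ... where prod(1-q^n) = sum a[k] q^k.
--     By the pentagonal number theorem:
--       prod(1-q^n) = sum_{k in Z} (-1)^k q^{k(3k-1)/2}
--     so only pentagonal-number indices are nonzero.
--     """
--     coeffs = [0] * num_terms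
--     # k ranges over all integers; k(3k-1)/2 for k and (-k)(3(-k)-1)/2 = k(3k+1)/2
--     for k in range(num_terms):
--         p1 = k * (3 * k - 1) // 2
--         p2 = k * (3 * k + 1) // 2
--         sign = (-1) ** k
--         if p1 < num_terms:
--             coeffs[p1] += sign
--         if k > 0 and p2 < num_terms:
--             coeffs[p2] += sign
--     return coeffs
-- ===== SOURCE B (Python) =====
-- def _isqrt(m):
--     """Floor integer square root of m >= 1 by Newton's method."""
--     x = m
--     y = (x + 1) // 2
--     while y < x:
--         x = y
--         y = (x + m // x) // 2
--     return x
--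
--
-- def _eta_coeffs(num_terms):
--     """Each coefficient independently by the closed-form inverse of the
--     pentagonal map: a[j] != 0 iff 24*j + 1 is a perfect square r*r
--     (then j = k*(3*k -+ 1)/2 with k = (r + 1) // 6) and a[j] = (-1)**k."""
--     out = []
--     for j in range(num_terms):
--         m = 24 * j + 1
--         r = _isqrt(m)
--         if r * r == m:
--             out.append(-1 if ((r + 1) // 6) % 2 else 1)
--         else:
--             out.append(0)
--     return out
-- ===== Notes on version B (the rewrite author's own statement) =====
-- stated objective: alternative
-- what changed: A sweeps all loop indices k and scatters signs onto pentagonal positions; B computes each coefficient independently by the closed-form inverse test: a[j] is nonzero iff 24*j+1 is a perfect square r*r (checked with a hand-written Newton integer square root), with sign (-1)**((r+1)//6).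
import Mathlib
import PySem

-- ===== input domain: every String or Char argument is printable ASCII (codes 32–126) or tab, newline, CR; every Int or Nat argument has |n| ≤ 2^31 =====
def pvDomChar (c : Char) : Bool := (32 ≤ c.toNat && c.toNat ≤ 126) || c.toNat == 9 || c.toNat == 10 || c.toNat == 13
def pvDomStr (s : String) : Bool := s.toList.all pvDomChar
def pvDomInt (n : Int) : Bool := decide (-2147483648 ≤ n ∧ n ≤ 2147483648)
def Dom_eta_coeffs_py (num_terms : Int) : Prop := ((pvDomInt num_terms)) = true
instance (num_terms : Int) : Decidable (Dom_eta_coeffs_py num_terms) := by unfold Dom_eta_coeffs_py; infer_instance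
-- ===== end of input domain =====

-- B drops A's scatter loop over k: each coefficient is computed independently by the
-- closed-form inverse test "24*j+1 is a perfect square" (Newton integer square root).

-- ===== PORT A =====
-- one body of A's for-loop (the two conditional in-place updates; indices are ≥ 0 and < len, so set/getD are exact)
def etaStepA (num_terms : Int) (coeffs : List Int) (k : Int) : List Int :=
  let p1 := PySem.Int.floordiv (k * (3 * k - 1)) 2
  let p2 := PySem.Int.floordiv (k * (3 * k + 1)) 2
  let sign : Int := (-1) ^ k.toNat
  let coeffs := if p1 < num_terms then coeffs.set p1.toNat (coeffs.getD p1.toNat 0 + sign) else coeffs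
  if 0 < k ∧ p2 < num_terms then coeffs.set p2.toNat (coeffs.getD p2.toNat 0 + sign) else coeffs

def eta_coeffs_py (num_terms : Int) : List Int :=
  (PySem.List.pyRange 0 num_terms 1).foldl (etaStepA num_terms) (List.replicate num_terms.toNat 0)

-- ===== PORT B =====
-- B's _isqrt while loop (Newton); the '1 ≤ y' conjunct only makes the recursion total
-- (for the m ≥ 1 this port is applied to, it always holds when y < x, see isqrtGo_spec)
def isqrtGo (m x y : Int) : Int :=
  if _h : y < x ∧ 1 ≤ y then
    isqrtGo m y (PySem.Int.floordiv (y + PySem.Int.floordiv m y) 2)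
  else x
termination_by x.toNat
decreasing_by omega

-- B's _isqrt: x = m; y = (x + 1) // 2; loop
def isqrt_port (m : Int) : Int := isqrtGo m m (PySem.Int.floordiv (m + 1) 2)

-- one body of B's for-loop over j
def etaTermB (j : Int) : Int :=
  let m := 24 * j + 1
  let r := isqrt_port m
  if r * r = m then
    (if PySem.Int.mod (PySem.Int.floordiv (r + 1) 6) 2 ≠ 0 then -1 else 1)
  else 0

def eta_coeffs_py_alt (num_terms : Int) : List Int :=
  (PySem.List.pyRange 0 num_terms 1).map etaTermB

-- ===== PRECONDITION & SPEC =====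
def Spec_eta_coeffs_py (num_terms : Int) (out : List Int) : Prop := out = eta_coeffs_py_alt num_terms
instance (num_terms : Int) (out : List Int) : Decidable (Spec_eta_coeffs_py num_terms out) := by unfold Spec_eta_coeffs_py; infer_instance

-- ===== CLAIM (what is proved, stated in full; the proofs are below) =====
def Claim_equal_eta_coeffs_py : Prop := ∀ (num_terms : Int), Dom_eta_coeffs_py num_terms → Spec_eta_coeffs_py num_terms (eta_coeffs_py num_terms)

-- ===== LEMMAS AND PROOFS =====

-- p1, p2 and the sign, in exact-division (ediv) form
def pent1 (k : Int) : Int := k * (3 * k - 1) / 2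
def pent2 (k : Int) : Int := k * (3 * k + 1) / 2
def sg (k : Int) : Int := (-1) ^ k.toNat
-- contribution of loop index k to coefficient j in A
def contrib (j k : Int) : Int :=
  (if pent1 k = j then sg k else 0) + (if 0 < k ∧ pent2 k = j then sg k else 0)

theorem fd1 (k : Int) : PySem.Int.floordiv (k * (3 * k - 1)) 2 = pent1 k := by
  rw [PySem.Int.floordiv_eq_ediv_of_pos (by norm_num)]; rfl

theorem fd2 (k : Int) : PySem.Int.floordiv (k * (3 * k + 1)) 2 = pent2 k := by
  rw [PySem.Int.floordiv_eq_ediv_of_pos (by norm_num)]; rfl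

theorem pent1_two_mul (k : Int) : 2 * pent1 k = k * (3 * k - 1) := by
  have h2 : 2 ∣ k * (3 * k - 1) := by
    rcases Int.even_or_odd k with ⟨m, hm⟩ | ⟨m, hm⟩
    · exact ⟨m * (6 * m - 1), by subst hm; ring⟩
    · exact ⟨(2 * m + 1) * (3 * m + 1), by subst hm; ring⟩
  rw [pent1, Int.mul_ediv_cancel' h2]

theorem pent2_two_mul (k : Int) : 2 * pent2 k = k * (3 * k + 1) := by
  have h2 : 2 ∣ k * (3 * k + 1) := by
    rcases Int.even_or_odd k with ⟨m, hm⟩ | ⟨m, hm⟩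
    · exact ⟨m * (6 * m + 1), by subst hm; ring⟩
    · exact ⟨(2 * m + 1) * (3 * m + 2), by subst hm; ring⟩
  rw [pent2, Int.mul_ediv_cancel' h2]

theorem pent_ge_two_mul (k : Int) : 2 * k ≤ k * (3 * k - 1) := by
  by_cases h : k ≤ 0
  · nlinarith [sq_nonneg k]
  · have h1 : (1 : Int) ≤ k := by omega
    nlinarith [mul_nonneg (by linarith : (0:Int) ≤ k) (by linarith : (0:Int) ≤ k - 1)]

theorem le_pent1 (k : Int) : k ≤ pent1 k := by
  have := pent1_two_mul k
  have := pent_ge_two_mul k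
  omega

theorem pent1_le_pent2 (k : Int) (h : 0 ≤ k) : pent1 k ≤ pent2 k := by
  have := pent1_two_mul k
  have := pent2_two_mul k
  nlinarith

theorem pent1_nonneg (k : Int) (h : 0 ≤ k) : 0 ≤ pent1 k := le_trans h (le_pent1 k)

theorem pent2_nonneg (k : Int) (h : 0 ≤ k) : 0 ≤ pent2 k :=
  le_trans (pent1_nonneg k h) (pent1_le_pent2 k h)

-- uniqueness of the pentagonal representation
theorem uniq11 (a b j : Int) (_ha : 0 ≤ a) (_hb : 0 ≤ b)
    (h1 : pent1 a = j) (h2 : pent1 b = j) : a = b := by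
  have e1 := pent1_two_mul a
  have e2 := pent1_two_mul b
  have key : (a - b) * (3 * (a + b) - 1) = 0 := by nlinarith
  rcases mul_eq_zero.mp key with h | h <;> omega

theorem uniq22 (a b j : Int) (_ha : 0 ≤ a) (_hb : 0 ≤ b)
    (h1 : pent2 a = j) (h2 : pent2 b = j) : a = b := by
  have e1 := pent2_two_mul a
  have e2 := pent2_two_mul b
  have key : (a - b) * (3 * (a + b) + 1) = 0 := by nlinarith
  rcases mul_eq_zero.mp key with h | h <;> omega

theorem uniq12 (a b j : Int) (ha : 0 ≤ a) (hb : 0 < b)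
    (h1 : pent1 a = j) (h2 : pent2 b = j) : False := by
  have e1 := pent1_two_mul a
  have e2 := pent2_two_mul b
  have key : (a + b) * (3 * (a - b) - 1) = 0 := by nlinarith
  rcases mul_eq_zero.mp key with h | h <;> omega

theorem not_both (k j : Int) (hk : 0 < k) (h1 : pent1 k = j) (h2 : pent2 k = j) : False :=
  uniq12 k k j (le_of_lt hk) hk h1 h2

theorem contrib_eq_zero (j k : Int) (h1 : pent1 k ≠ j) (h2 : ¬(0 < k ∧ pent2 k = j)) :
    contrib j k = 0 := by simp [contrib, h1, h2]

-- ===== A-side: the fold adds contrib j k to entry j at each step =====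

theorem etaStepA_length (n : Int) (l : List Int) (k : Int) :
    (etaStepA n l k).length = l.length := by
  simp only [etaStepA]
  split_ifs <;> simp

theorem getD_set_eq' (l : List Int) (i j : Nat) (x : Int) (hi : i < l.length) :
    (l.set i x).getD j 0 = if j = i then x else l.getD j 0 := by
  rcases eq_or_ne j i with rfl | h
  · simp [List.getD_eq_getElem?_getD, hi]
  · simp [List.getD_eq_getElem?_getD, List.getElem?_set_ne (Ne.symm h), h]

theorem etaStepA_getD (n : Int) (l : List Int) (k j : Int)
    (hl : l.length = n.toNat) (hj0 : 0 ≤ j) (hjn : j < n) (hk : 0 ≤ k) :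
    (etaStepA n l k).getD j.toNat 0 = l.getD j.toNat 0 + contrib j k := by
  have hp1 : 0 ≤ pent1 k := pent1_nonneg k hk
  have hp2 : 0 ≤ pent2 k := pent2_nonneg k hk
  simp only [etaStepA, fd1, fd2, contrib]
  set s := (-1 : Int) ^ k.toNat with hs
  have hsg : sg k = s := rfl
  by_cases h1 : pent1 k < n
  · have hlen1 : (pent1 k).toNat < l.length := by omega
    by_cases h2 : 0 < k ∧ pent2 k < n
    · rw [if_pos h1, if_pos h2]
      have hlen2 : (pent2 k).toNat < (l.set (pent1 k).toNat (l.getD (pent1 k).toNat 0 + s)).length := by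
        simp; omega
      rw [getD_set_eq' _ _ _ _ hlen2]
      by_cases e2 : pent2 k = j
      · subst e2
        have e1 : ¬ pent1 k = pent2 k := fun h => not_both k (pent2 k) h2.1 h rfl
        rw [if_pos rfl, getD_set_eq' _ _ _ _ hlen1, if_neg (by omega), if_neg e1,
          if_pos ⟨h2.1, rfl⟩, hsg]
        ring
      · by_cases e1 : pent1 k = j
        · subst e1
          rw [if_neg (by omega : ¬ (pent1 k).toNat = (pent2 k).toNat),
            getD_set_eq' _ _ _ _ hlen1, if_pos rfl, if_pos rfl,
            if_neg (fun h => e2 h.2), hsg]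
          ring
        · rw [if_neg (by omega : ¬ j.toNat = (pent2 k).toNat),
            getD_set_eq' _ _ _ _ hlen1, if_neg (by omega : ¬ j.toNat = (pent1 k).toNat),
            if_neg e1, if_neg (fun h => e2 h.2)]
          ring
    · rw [if_pos h1, if_neg h2, getD_set_eq' _ _ _ _ hlen1]
      have e2 : ¬ (0 < k ∧ pent2 k = j) := fun h => h2 ⟨h.1, by omega⟩
      by_cases e1 : pent1 k = j
      · subst e1
        rw [if_pos rfl, if_pos rfl, if_neg e2, hsg]; ring
      · rw [if_neg (by omega : ¬ j.toNat = (pent1 k).toNat), if_neg e1, if_neg e2]; ring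
  · have e1 : ¬ pent1 k = j := by omega
    rw [if_neg h1]
    by_cases h2 : 0 < k ∧ pent2 k < n
    · rw [if_pos h2, getD_set_eq' _ _ _ _ (by omega)]
      by_cases e2 : pent2 k = j
      · subst e2
        rw [if_pos rfl, if_neg e1, if_pos ⟨h2.1, rfl⟩, hsg]; ring
      · rw [if_neg (by omega : ¬ j.toNat = (pent2 k).toNat), if_neg e1,
          if_neg (fun h => e2 h.2)]
        ring
    · have e2 : ¬ (0 < k ∧ pent2 k = j) := fun h => h2 ⟨h.1, by omega⟩
      rw [if_neg h2, if_neg e1, if_neg e2]; ring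

theorem foldA_getD (n j : Int) (hj0 : 0 ≤ j) (hjn : j < n) :
    ∀ (ks : List Int), (∀ k ∈ ks, 0 ≤ k) → ∀ (l : List Int), l.length = n.toNat →
      ((ks.foldl (etaStepA n) l).getD j.toNat 0) = l.getD j.toNat 0 + (ks.map (contrib j)).sum := by
  intro ks
  induction ks with
  | nil => intro _ l _; simp
  | cons a ks ih =>
      intro hmem l hl
      have ha : 0 ≤ a := hmem a (by simp)
      have h1 := etaStepA_getD n l a j hl hj0 hjn ha
      have h2 := ih (fun k hk => hmem k (by simp [hk])) (etaStepA n l a) (by rw [etaStepA_length]; exact hl)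
      simp only [List.foldl_cons, List.map_cons, List.sum_cons]
      rw [h2, h1]; ring

theorem sum_single (f : Int → Int) (k0 : Int) :
    ∀ ks : List Int, ks.Nodup → (∀ k ∈ ks, k ≠ k0 → f k = 0) →
      (ks.map f).sum = if k0 ∈ ks then f k0 else 0 := by
  intro ks
  induction ks with
  | nil => simp
  | cons a ks ih =>
      intro hnd hz
      rcases List.nodup_cons.mp hnd with ⟨hna, hnd'⟩
      by_cases hak : a = k0
      · subst hak
        have : (ks.map f).sum = 0 := by
          apply List.sum_eq_zero
          intro x hx
          rcases List.mem_map.mp hx with ⟨k, hk, rfl⟩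
          exact hz k (by simp [hk]) (fun h => hna (h ▸ hk))
        simp [this]
      · have hrec := ih hnd' (fun k hk h => hz k (by simp [hk]) h)
        have hmem : (k0 ∈ a :: ks) ↔ (k0 ∈ ks) := by
          constructor
          · intro h
            rcases List.mem_cons.mp h with h | h
            · exact absurd h.symm hak
            · exact h
          · intro h; exact List.mem_cons_of_mem _ h
        simp only [List.map_cons, List.sum_cons, hrec, hz a (by simp) hak, zero_add]
        rw [if_congr hmem rfl rfl]

-- the sum of contributions when k0 hits j
theorem sum_eq_sg (n j k0 : Int) (hj0 : 0 ≤ j) (hjn : j < n) (hk0 : 0 ≤ k0)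
    (hc : pent1 k0 = j ∨ (0 < k0 ∧ pent2 k0 = j)) :
    ((PySem.List.pyRange 0 n 1).map (contrib j)).sum = sg k0 := by
  have hnd := PySem.List.nodup_pyRange_one (a := 0) (b := n)
  rcases hc with hp | ⟨hpos, hp⟩
  · have hk0n : k0 < n := by have := le_pent1 k0; omega
    have hz : ∀ k ∈ PySem.List.pyRange 0 n 1, k ≠ k0 → contrib j k = 0 := by
      intro k hk hne
      have hk' : 0 ≤ k := ((PySem.List.mem_pyRange_one).mp hk).1
      apply contrib_eq_zero
      · intro h; exact hne (uniq11 k k0 j hk' hk0 h hp)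
      · rintro ⟨hpos, h⟩; exact uniq12 k0 k j hk0 hpos hp h
    rw [sum_single (contrib j) k0 _ hnd hz,
      if_pos ((PySem.List.mem_pyRange_one).mpr ⟨hk0, hk0n⟩)]
    have h2 : ¬ (0 < k0 ∧ pent2 k0 = j) := fun h => not_both k0 j h.1 hp h.2
    simp [contrib, hp, h2]
  · have hk0n : k0 < n := by
      have := le_pent1 k0
      have := pent1_le_pent2 k0 (by omega)
      omega
    have hno1 : ∀ k, 0 ≤ k → pent1 k ≠ j := fun k hk h => uniq12 k k0 j hk hpos h hp
    have hz : ∀ k ∈ PySem.List.pyRange 0 n 1, k ≠ k0 → contrib j k = 0 := by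
      intro k hk hne
      have hk' : 0 ≤ k := ((PySem.List.mem_pyRange_one).mp hk).1
      apply contrib_eq_zero
      · exact hno1 k hk'
      · rintro ⟨hpos', h⟩; exact hne (uniq22 k k0 j hk' (by omega) h hp)
    rw [sum_single (contrib j) k0 _ hnd hz,
      if_pos ((PySem.List.mem_pyRange_one).mpr ⟨by omega, hk0n⟩)]
    simp [contrib, hno1 k0 (by omega : (0:Int) ≤ k0), hpos, hp]

theorem sum_eq_zero' (n j : Int)
    (hno1 : ∀ k, 0 ≤ k → pent1 k ≠ j) (hno2 : ∀ k, 0 < k → pent2 k ≠ j) :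
    ((PySem.List.pyRange 0 n 1).map (contrib j)).sum = 0 := by
  apply List.sum_eq_zero
  intro x hx
  rcases List.mem_map.mp hx with ⟨k, hk, rfl⟩
  have hk' : 0 ≤ k := ((PySem.List.mem_pyRange_one).mp hk).1
  exact contrib_eq_zero j k (hno1 k hk') (fun h => hno2 k h.1 h.2)

-- ===== B-side: correctness of Newton's integer square root =====

theorem isqrtGo_spec (m : Int) (hm : 1 ≤ m) :
    ∀ (c : Nat) (x y : Int), x.toNat ≤ c → 1 ≤ x → m < (x + 1) * (x + 1) →
      y = PySem.Int.floordiv (x + PySem.Int.floordiv m x) 2 →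
      1 ≤ isqrtGo m x y ∧ isqrtGo m x y * isqrtGo m x y ≤ m ∧
        m < (isqrtGo m x y + 1) * (isqrtGo m x y + 1) := by
  intro c
  induction c with
  | zero => intro x y hc hx _ _; omega
  | succ c ih =>
      intro x y hc hx hub hy
      rw [PySem.Int.floordiv_eq_ediv_of_pos (by norm_num),
          PySem.Int.floordiv_eq_ediv_of_pos (by omega)] at hy
      set q := m / x with hq
      have hqx : m % x + q * x = m := Int.emod_add_ediv_mul m x
      have hs0 : 0 ≤ m % x := Int.emod_nonneg m (by omega)
      have hs1 : m % x < x := Int.emod_lt_of_pos m (by omega)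
      have hq0 : 0 ≤ q := Int.ediv_nonneg (by omega) (by omega)
      -- y = (x+q)/2, so 2y ≤ x+q ≤ 2y+1
      have hy2 : 2 * y ≤ x + q ∧ x + q ≤ 2 * y + 1 := by omega
      by_cases hlt : y < x
      · -- x = 1 would force ¬ y < x
        have hx2 : 2 ≤ x := by
          rcases eq_or_lt_of_le hx with h1 | h2
          · exfalso
            have : q = m := by rw [hq, ← h1]; simp
            omega
          · omega
        have hy1 : 1 ≤ y := by omega
        have hyub : m < (y + 1) * (y + 1) := by
          nlinarith [sq_nonneg (x - (q + 1))]
        rw [isqrtGo, dif_pos ⟨hlt, hy1⟩]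
        exact ih y _ (by omega) hy1 hyub
          (by rw [PySem.Int.floordiv_eq_ediv_of_pos (by norm_num),
                  PySem.Int.floordiv_eq_ediv_of_pos (by omega)])
      · -- exit: y ≥ x, hence x ≤ q, hence x*x ≤ m
        rw [isqrtGo, dif_neg (by omega)]
        refine ⟨hx, ?_, hub⟩
        have hxq : x ≤ q := by omega
        nlinarith

theorem isqrt_spec (m : Int) (hm : 1 ≤ m) :
    1 ≤ isqrt_port m ∧ isqrt_port m * isqrt_port m ≤ m ∧
      m < (isqrt_port m + 1) * (isqrt_port m + 1) := by
  have hmm : PySem.Int.floordiv m m = 1 := by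
    rw [PySem.Int.floordiv_eq_ediv_of_pos (by omega : (0:Int) < m)]
    exact Int.ediv_self (by omega)
  have h1 : PySem.Int.floordiv (m + 1) 2
      = PySem.Int.floordiv (m + PySem.Int.floordiv m m) 2 := by rw [hmm]
  exact isqrtGo_spec m hm m.toNat m _ le_rfl hm (by nlinarith) h1

theorem sq_unique (m a b : Int) (ha : 0 ≤ a) (hb : 0 ≤ b)
    (h1 : a * a ≤ m) (h2 : m < (a + 1) * (a + 1)) (h3 : b * b = m) : a = b := by
  have hba : b ≤ a := by nlinarith
  have hab : a ≤ b := by nlinarith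
  omega

-- sign via parity of k
theorem sg_eq_parity (k : Int) (hk : 0 ≤ k) :
    (if PySem.Int.mod k 2 ≠ 0 then (-1 : Int) else 1) = sg k := by
  rw [PySem.Int.mod_eq_emod_of_pos (by norm_num)]
  rcases Int.even_or_odd k with ⟨t, ht⟩ | ⟨t, ht⟩
  · have hm : k % 2 = 0 := by omega
    have he : Even k.toNat := by
      rw [Nat.even_iff]; omega
    rw [if_neg (by omega), sg, Even.neg_one_pow he]
  · have hm : k % 2 = 1 := by omega
    have ho : Odd k.toNat := by
      rw [Nat.odd_iff]; omega
    rw [if_pos (by omega), sg, Odd.neg_one_pow ho]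

-- ===== bridge: A's entry j = B's term at j =====

theorem entry_eq (n j : Int) (hj0 : 0 ≤ j) (hjn : j < n) :
    ((PySem.List.pyRange 0 n 1).map (contrib j)).sum = etaTermB j := by
  obtain ⟨hr1, hrle, hrlt⟩ := isqrt_spec (24 * j + 1) (by omega)
  set r := isqrt_port (24 * j + 1) with hrdef
  have hB : etaTermB j = if r * r = 24 * j + 1 then
      (if PySem.Int.mod (PySem.Int.floordiv (r + 1) 6) 2 ≠ 0 then -1 else 1) else 0 := rfl
  rw [hB]
  by_cases hsq : r * r = 24 * j + 1
  · rw [if_pos hsq]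
    -- r is odd and not divisible by 3
    have hodd : r % 2 = 1 := by
      rcases Int.even_or_odd r with ⟨t, ht⟩ | ⟨t, ht⟩
      · exfalso
        have h4 : 4 * (t * t) = 24 * j + 1 := by rw [ht] at hsq; nlinarith
        set u := t * t
        omega
      · omega
    have h3 : r % 3 ≠ 0 := by
      intro h
      obtain ⟨t, ht⟩ : (3:Int) ∣ r := Int.dvd_of_emod_eq_zero h
      have h9 : 9 * (t * t) = 24 * j + 1 := by rw [ht] at hsq; nlinarith
      set u := t * t
      omega
    have h6 : r % 6 = 1 ∨ r % 6 = 5 := by omega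
    -- k = (r + 1) // 6 in both cases
    have hfd6 : PySem.Int.floordiv (r + 1) 6 = (r + 1) / 6 :=
      PySem.Int.floordiv_eq_ediv_of_pos (by norm_num)
    rcases h6 with h61 | h65
    · -- r = 6k + 1 : j = pent2 k (and for k = 0 also pent1 0 = 0 = j)
      set k := (r + 1) / 6 with hkdef
      have hk : r = 6 * k + 1 := by omega
      have hk0 : 0 ≤ k := by omega
      have hp2 : pent2 k = j := by
        have h2 := pent2_two_mul k
        have hx : k * (3 * k + 1) = 2 * j := by nlinarith
        omega
      have hc : pent1 k = j ∨ (0 < k ∧ pent2 k = j) := by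
        rcases eq_or_lt_of_le hk0 with h0 | hpos
        · left
          rw [← h0] at hp2 ⊢
          have e1 : pent1 0 = 0 := by decide
          have e2 : pent2 0 = 0 := by decide
          omega
        · right; exact ⟨hpos, hp2⟩
      rw [sum_eq_sg n j k hj0 hjn hk0 hc, hfd6]
      exact (sg_eq_parity k hk0).symm
    · -- r = 6k - 1, k ≥ 1 : j = pent1 k
      set k := (r + 1) / 6 with hkdef
      have hk : r = 6 * k - 1 := by omega
      have hk0 : 1 ≤ k := by omega
      have hp1 : pent1 k = j := by
        have h2 := pent1_two_mul k
        have hx : k * (3 * k - 1) = 2 * j := by nlinarith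
        omega
      rw [sum_eq_sg n j k hj0 hjn (by omega) (Or.inl hp1), hfd6]
      exact (sg_eq_parity k (by omega)).symm
  · rw [if_neg hsq]
    apply sum_eq_zero'
    · intro k hk hp
      rcases eq_or_lt_of_le hk with h0 | hpos
      · -- k = 0 : j = 0, so r * r = 1
        have e1 : pent1 0 = 0 := by decide
        rw [← h0] at hp
        have hj : j = 0 := by omega
        have hr : r = 1 :=
          sq_unique (24 * j + 1) r 1 (by omega) (by omega) hrle hrlt (by rw [hj]; norm_num)
        exact hsq (by rw [hr, hj]; norm_num)
      · have hb : (6 * k - 1) * (6 * k - 1) = 24 * j + 1 := by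
          have h2 := pent1_two_mul k
          nlinarith
        have hr : r = 6 * k - 1 :=
          sq_unique (24 * j + 1) r (6 * k - 1) (by omega) (by omega) hrle hrlt hb
        exact hsq (by rw [hr]; exact hb)
    · intro k hk hp
      have hb : (6 * k + 1) * (6 * k + 1) = 24 * j + 1 := by
        have h2 := pent2_two_mul k
        nlinarith
      have hr : r = 6 * k + 1 :=
        sq_unique (24 * j + 1) r (6 * k + 1) (by omega) (by omega) hrle hrlt hb
      exact hsq (by rw [hr]; exact hb)

theorem eta_len_A (n : Int) : (eta_coeffs_py n).length = n.toNat := by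
  have : ∀ (ks : List Int) (l : List Int),
      (ks.foldl (etaStepA n) l).length = l.length := by
    intro ks
    induction ks with
    | nil => intro l; rfl
    | cons a ks ih => intro l; simp only [List.foldl_cons]; rw [ih, etaStepA_length]
  simp [eta_coeffs_py, this]

theorem eta_len_B (n : Int) : (eta_coeffs_py_alt n).length = n.toNat := by
  simp [eta_coeffs_py_alt, PySem.List.length_pyRange_one]

theorem eta_lists_eq (n : Int) : eta_coeffs_py n = eta_coeffs_py_alt n := by
  apply List.ext_getElem (by rw [eta_len_A, eta_len_B])
  intro i hiA hiB
  have hin : i < n.toNat := by rw [eta_len_A] at hiA; exact hiA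
  have hn : (i : Int) < n := by omega
  have hjt : ((i : Int)).toNat = i := Int.toNat_natCast i
  have hA : (eta_coeffs_py n)[i] = (eta_coeffs_py n).getD i 0 := by
    rw [List.getD_eq_getElem?_getD, List.getElem?_eq_getElem hiA]; rfl
  have hfold := foldA_getD n (i : Int) (by omega) hn (PySem.List.pyRange 0 n 1)
    (fun k hk => ((PySem.List.mem_pyRange_one).mp hk).1)
    (List.replicate n.toNat 0) (by simp)
  rw [hjt] at hfold
  have hrep : (List.replicate n.toNat (0 : Int)).getD i 0 = 0 := by
    simp [List.getD_eq_getElem?_getD]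
  have hB : (eta_coeffs_py_alt n)[i] = etaTermB ((0 : Int) + (i : Int)) := by
    simp only [eta_coeffs_py_alt, List.getElem_map]
    rw [PySem.List.getElem_pyRange_one]
  rw [hA, hB]
  show (eta_coeffs_py n).getD i 0 = etaTermB (0 + (i : Int))
  rw [eta_coeffs_py, hfold, hrep, zero_add, zero_add,
    entry_eq n (i : Int) (by omega) hn]

-- ===== VERDICT (by name: the statement is the Claim_ definition above) =====
theorem eta_coeffs_py_spec : Claim_equal_eta_coeffs_py := by
  intro n _
  unfold Spec_eta_coeffs_py
  exact eta_lists_eq n
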